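-- pv_equiv track=rewrite | github.com/JMU-CS/course-connections | gen_chord_graph.py | gen_graph
-- ===== SOURCE A (Python) =====
-- def all_tags(courses, tags):
--     tagSet = set()
--     for course in courses:
--         tagSet = tagSet | tags[course]
--     retList = list(tagSet)
--     retList.sort()
--     return retList
--
-- def gen_graph(courses, tags):
--     matrixStr = "var matrix = ["
--     for i in range(len(courses)):
--         matrixStr += "["
--         for j in range(len(courses)):
--             if i != j:
--                 weight = len(tags[courses[i]] & tags[courses[j]])
--             else:
--                 weight = 0
--             matrixStr += str(weight)
--             if j < len(courses)-1:
--                 matrixStr += ","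
--         matrixStr += "]"
--         if i < len(courses)-1:
--             matrixStr += ",\n"
--     matrixStr += "];\n\n"
--
--     coursesStr = "var courseLabels = [\n"
--     titlesStr = "var courseTitles = [\n"
--     for i in range(len(courses)):
--         if i != 0:
--             coursesStr += ",\n"
--             titlesStr += ",\n"
--         coursesStr += "    \"" + courses[i][0:6] + "\""
--         titlesStr += "    \"" + courses[i][7:] + "\""
--     coursesStr += "\n];\n\n"
--     titlesStr += "\n];\n\n"
--
--     tagStr = "var tags = [\n"
--     tagList = all_tags(courses, tags)
--     for i in range(len(tagList)):
--         if i != 0: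
--             tagStr += ",\n"
--         tagStr += "    \"" + tagList[i] + "\""
--     tagStr += "\n];\n\n"
--
--     return matrixStr + coursesStr + titlesStr + tagStr
-- ===== SOURCE B (Python) =====
-- def gen_graph(courses, tags):
--     n = len(courses)
--     tagSets = [tags[c] for c in courses]
--     # inverted index: tag -> list of course indices carrying it
--     owners = {}
--     for i, s in enumerate(tagSets):
--         for t in s:
--             owners[t] = owners.get(t, []) + [i]
--     rows = []
--     for i, s in enumerate(tagSets):
--         cnt = {}
--         for t in s:
--             for j in owners[t]:
--                 cnt[j] = cnt.get(j, 0) + 1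
--         rows.append("[" + ",".join("0" if j == i else str(cnt.get(j, 0)) for j in range(n)) + "]")
--     matrixStr = "var matrix = [" + ",\n".join(rows) + "];\n\n"
--     labels = ",\n".join('    "' + c[0:6] + '"' for c in courses)
--     titles = ",\n".join('    "' + c[7:] + '"' for c in courses)
--     u = set()
--     for s in tagSets:
--         u = u | s
--     tagList = sorted(u)
--     tagsJ = ",\n".join('    "' + t + '"' for t in tagList)
--     return (matrixStr
--             + "var courseLabels = [\n" + labels + "\n];\n\n"
--             + "var courseTitles = [\n" + titles + "\n];\n\n"
--             + "var tags = [\n" + tagsJ + "\n];\n\n")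
-- ===== Notes on version B (the rewrite author's own statement) =====
-- stated objective: faster
-- what changed: B replaces A's per-pair set intersections (computed for every ordered pair of courses) by an inverted index mapping each tag to the list of course indices carrying it, from which each matrix row is obtained as a counter over the index lists of that course's tags; all four output sections are emitted with str.join instead of index loops with conditional separators.
import Mathlib
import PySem

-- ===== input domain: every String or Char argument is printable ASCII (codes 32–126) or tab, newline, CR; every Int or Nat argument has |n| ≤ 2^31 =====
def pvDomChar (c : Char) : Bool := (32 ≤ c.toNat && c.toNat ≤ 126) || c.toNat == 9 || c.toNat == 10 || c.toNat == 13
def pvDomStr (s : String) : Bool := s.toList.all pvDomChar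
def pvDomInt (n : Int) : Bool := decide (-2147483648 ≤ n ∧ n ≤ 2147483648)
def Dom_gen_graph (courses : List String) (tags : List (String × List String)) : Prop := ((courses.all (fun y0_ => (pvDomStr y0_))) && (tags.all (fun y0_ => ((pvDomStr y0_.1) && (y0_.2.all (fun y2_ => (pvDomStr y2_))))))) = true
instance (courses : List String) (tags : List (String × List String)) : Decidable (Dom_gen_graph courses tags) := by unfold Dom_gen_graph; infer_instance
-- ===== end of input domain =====

-- B replaces A's per-pair set intersections by an inverted index (tag -> course indices)
-- and per-row counters, and emits each section with str.join; return value only, no mutation.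

-- ===== PORT A =====
-- helper all_tags: 'list(tagSet); retList.sort()' is sorted(tagSet) — sorting makes the
-- (unmodelled) set iteration order irrelevant, so this port is exact.
def all_tags_port (courses : List String) (tags : List (String × List String)) : List String :=
  let d := PySem.Dict.mk tags
  let tagSet := courses.foldl (fun s c => PySem.Set.union s (PySem.Set.ofList (d.getD c []))) PySem.Set.empty
  PySem.List.sorted tagSet (fun x => x) false

-- tags[course] is exact under Pre_gen_graph (every course is a key); 'tags' values denote
-- Python sets, materialised with PySem.Set.ofList.
def gen_graph (courses : List String) (tags : List (String × List String)) : String :=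
  let d := PySem.Dict.mk tags
  let n : Int := PySem.List.len courses
  let matrixStr :=
    (PySem.List.pyRange 0 n).foldl (fun acc i =>
      let acc := acc ++ "["
      let acc := (PySem.List.pyRange 0 n).foldl (fun acc j =>
        let weight : Int :=
          if i ≠ j then
            PySem.Set.len (PySem.Set.inter
              (PySem.Set.ofList (d.getD (PySem.List.pyGetD courses i "") []))
              (PySem.Set.ofList (d.getD (PySem.List.pyGetD courses j "") [])))
          else 0
        let acc := acc ++ PySem.Int.toStr weight
        if j < n - 1 then acc ++ "," else acc) acc
      let acc := acc ++ "]"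
      if i < n - 1 then acc ++ ",\n" else acc) "var matrix = ["
  let matrixStr := matrixStr ++ "];\n\n"
  let p :=
    (PySem.List.pyRange 0 n).foldl (fun (p : String × String) i =>
      ((if i ≠ 0 then p.1 ++ ",\n" else p.1) ++ "    \"" ++ PySem.Str.slice (PySem.List.pyGetD courses i "") (some 0) (some 6) ++ "\"",
       (if i ≠ 0 then p.2 ++ ",\n" else p.2) ++ "    \"" ++ PySem.Str.slice (PySem.List.pyGetD courses i "") (some 7) none ++ "\""))
      ("var courseLabels = [\n", "var courseTitles = [\n")
  let coursesStr := p.1 ++ "\n];\n\n"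
  let titlesStr := p.2 ++ "\n];\n\n"
  let tagList := all_tags_port courses tags
  let tagStr :=
    (PySem.List.pyRange 0 (PySem.List.len tagList)).foldl (fun acc i =>
      (if i ≠ 0 then acc ++ ",\n" else acc) ++ "    \"" ++ PySem.List.pyGetD tagList i "" ++ "\"")
      "var tags = [\n"
  let tagStr := tagStr ++ "\n];\n\n"
  matrixStr ++ coursesStr ++ titlesStr ++ tagStr

-- ===== PORT B =====
def gen_graph_alt (courses : List String) (tags : List (String × List String)) : String :=
  let d := PySem.Dict.mk tags
  let n : Int := PySem.List.len courses
  let tagSets : List (PySem.Set String) := courses.map (fun c => PySem.Set.ofList (d.getD c []))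
  let owners : PySem.Dict String (List Int) :=
    (PySem.List.enumerate tagSets).foldl (fun o p =>
      p.2.foldl (fun o t => o.modify t [] (fun l => l ++ [p.1])) o) PySem.Dict.empty
  let rows : List String :=
    (PySem.List.enumerate tagSets).map (fun p =>
      let cnt : PySem.Dict Int Int :=
        p.2.foldl (fun c t => (owners.getD t []).foldl (fun c j => c.modify j 0 (fun v => v + 1)) c) PySem.Dict.empty
      "[" ++ PySem.Str.join "," ((PySem.List.pyRange 0 n).map (fun j =>
        if j == p.1 then "0" else PySem.Int.toStr (cnt.getD j 0))) ++ "]")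
  let matrixStr := "var matrix = [" ++ PySem.Str.join ",\n" rows ++ "];\n\n"
  let labels := PySem.Str.join ",\n" (courses.map (fun c => "    \"" ++ PySem.Str.slice c (some 0) (some 6) ++ "\""))
  let titles := PySem.Str.join ",\n" (courses.map (fun c => "    \"" ++ PySem.Str.slice c (some 7) none ++ "\""))
  let u := tagSets.foldl (fun u s => PySem.Set.union u s) PySem.Set.empty
  let tagList := PySem.List.sorted u (fun x => x) false
  let tagsJ := PySem.Str.join ",\n" (tagList.map (fun t => "    \"" ++ t ++ "\""))
  matrixStr ++ ("var courseLabels = [\n" ++ labels ++ "\n];\n\n")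
            ++ ("var courseTitles = [\n" ++ titles ++ "\n];\n\n")
            ++ ("var tags = [\n" ++ tagsJ ++ "\n];\n\n")

-- ===== PRECONDITION & SPEC =====
-- Pre_: every course must be a key of tags, otherwise Python's tags[course] raises KeyError.
def Pre_gen_graph (courses : List String) (tags : List (String × List String)) : Prop :=
  ∀ c ∈ courses, (PySem.Dict.mk tags).contains c = true
instance (courses : List String) (tags : List (String × List String)) : Decidable (Pre_gen_graph courses tags) := by unfold Pre_gen_graph; infer_instance

def pvWitness_gen_graph : List String × (List (String × List String)) :=
  (["CS101 Intro", "CS240 DSA"], [("CS101 Intro", ["p", "q"]), ("CS240 DSA", ["q"])])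

def Spec_gen_graph (courses : List String) (tags : List (String × List String)) (out : String) : Prop := out = gen_graph_alt courses tags
instance (courses : List String) (tags : List (String × List String)) (out : String) : Decidable (Spec_gen_graph courses tags out) := by unfold Spec_gen_graph; infer_instance

-- ===== CLAIM (what is proved, stated in full; the proofs are below) =====
def Claim_equal_gen_graph : Prop := ∀ (courses : List String) (tags : List (String × List String)), Dom_gen_graph courses tags → Pre_gen_graph courses tags → Spec_gen_graph courses tags (gen_graph courses tags)

-- ===== LEMMAS AND PROOFS =====

-- String-level join facts
lemma sjoin_nil (sep : String) : PySem.Str.join sep [] = "" := by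
  simp [PySem.Str.join, PySem.Chars.join_nil]

lemma sjoin_singleton (sep x : String) : PySem.Str.join sep [x] = x := by
  simp [PySem.Str.join, PySem.Chars.join_singleton, String.ofList_toList]

lemma sjoin_cons_cons (sep x y : String) (l : List String) :
    PySem.Str.join sep (x :: y :: l) = x ++ (sep ++ PySem.Str.join sep (y :: l)) := by
  simp [PySem.Str.join, PySem.Chars.join_cons_cons, String.ofList_append, String.ofList_toList]

-- separator AFTER every element except the last (A's matrix loops)
lemma foldl_sepafter (f : Int → String) (sep : String) (b : Int) :
    ∀ (k : Nat) (a : Int), (b - a).toNat = k → ∀ s : String,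
    (PySem.List.pyRange a b).foldl
      (fun acc j => if j < b - 1 then (acc ++ f j) ++ sep else acc ++ f j) s
    = s ++ PySem.Str.join sep ((PySem.List.pyRange a b).map f) := by
  intro k
  induction k with
  | zero =>
    intro a hk s
    rw [PySem.List.pyRange_one_eq_nil (by omega)]
    simp [sjoin_nil, String.append_empty]
  | succ k ih =>
    intro a hk s
    have hab : a < b := by omega
    rw [PySem.List.pyRange_one_cons hab]
    by_cases h : a < b - 1
    · have hcons := PySem.List.pyRange_one_cons (show a + 1 < b by omega)
      simp only [List.foldl_cons, if_pos h]
      rw [ih (a+1) (by omega) ((s ++ f a) ++ sep)]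
      rw [List.map_cons, hcons, List.map_cons, sjoin_cons_cons]
      simp [String.append_assoc]
    · have : a = b - 1 := by omega
      have hnil : PySem.List.pyRange (a+1) b = [] := PySem.List.pyRange_one_eq_nil (by omega)
      simp only [List.foldl_cons, if_neg h, hnil, List.foldl_nil, List.map_cons, List.map_nil,
        sjoin_singleton]

lemma str_foldl_append (g : Int → String) (l : List Int) (s : String) :
    l.foldl (fun acc x => acc ++ g x) s = s ++ l.foldl (fun acc x => acc ++ g x) "" := by
  induction l generalizing s with
  | nil => simp [String.append_empty]
  | cons x xs ih =>
    simp only [List.foldl_cons]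
    rw [ih (s ++ g x), ih ("" ++ g x)]
    simp [String.append_assoc]

lemma join_eq_foldl (sep : String) (f : Int → String) (x : Int) (l : List Int) :
    PySem.Str.join sep ((x :: l).map f)
    = f x ++ l.foldl (fun acc i => acc ++ (sep ++ f i)) "" := by
  induction l generalizing x with
  | nil => simp [sjoin_singleton, String.append_empty]
  | cons y ys ih =>
    rw [List.map_cons, List.map_cons, sjoin_cons_cons, ← List.map_cons, ih y]
    simp only [List.foldl_cons]
    rw [str_foldl_append (fun i => sep ++ f i) ys ("" ++ (sep ++ f y))]
    simp [String.append_assoc]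

-- separator BEFORE every element except the first (A's label/title/tag loops)
lemma foldl_sepbefore (f : Int → String) (sep : String) (n : Int) (s : String) :
    (PySem.List.pyRange 0 n).foldl
      (fun acc i => (if i ≠ 0 then acc ++ sep else acc) ++ f i) s
    = s ++ PySem.Str.join sep ((PySem.List.pyRange 0 n).map f) := by
  by_cases hn : n ≤ 0
  · rw [PySem.List.pyRange_one_eq_nil (by omega)]
    simp [sjoin_nil, String.append_empty]
  · rw [PySem.List.pyRange_one_cons (by omega : (0:Int) < n)]
    simp only [List.foldl_cons, if_neg (by simp : ¬ (0:Int) ≠ 0)]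
    rw [PySem.List.foldl_congr_mem _ _
        (fun acc i => acc ++ (sep ++ f i)) _
        (by
          intro acc x hx
          have hx1 : (1:Int) ≤ x := (PySem.List.mem_pyRange_one.mp hx).1
          rw [if_pos (by omega : x ≠ 0), String.append_assoc])]
    rw [str_foldl_append (fun i => sep ++ f i) _ (s ++ f 0), join_eq_foldl]
    simp [String.append_assoc]

-- the tag sets and the inverted index, as B names them
def tagSetsOf (courses : List String) (tags : List (String × List String)) : List (PySem.Set String) :=
  courses.map (fun c => PySem.Set.ofList ((PySem.Dict.mk tags).getD c []))

def ownersOf (courses : List String) (tags : List (String × List String)) : PySem.Dict String (List Int) :=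
  (PySem.List.enumerate (tagSetsOf courses tags)).foldl (fun o p =>
      p.2.foldl (fun o t => o.modify t [] (fun l => l ++ [p.1])) o) PySem.Dict.empty

lemma flatMap_ite_singleton {α β : Type} (q : α → Bool) (g : α → β) (l : List α) :
    l.flatMap (fun x => if q x then [g x] else []) = (l.filter q).map g := by
  induction l with
  | nil => rfl
  | cons x xs ih => by_cases h : q x <;> simp [List.flatMap_cons, h, ih]

lemma nodup_mem_tagSets (courses : List String) (tags : List (String × List String))
    (s : PySem.Set String) (hs : s ∈ tagSetsOf courses tags) : s.Nodup := by
  simp only [tagSetsOf, List.mem_map] at hs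
  obtain ⟨c, _, rfl⟩ := hs
  exact PySem.Set.nodup_ofList _

-- the inverted index lists exactly the courses carrying each tag, in index order
lemma owners_getD (courses : List String) (tags : List (String × List String)) (t : String) :
    (ownersOf courses tags).getD t []
    = ((PySem.List.enumerate (tagSetsOf courses tags)).filter (fun p => p.2.contains t)).map (·.1) := by
  have h1 : ownersOf courses tags
      = ((PySem.List.enumerate (tagSetsOf courses tags)).flatMap
          (fun p => p.2.map (fun u => (u, p.1)))).foldl
          (fun o q => o.modify q.1 [] (fun l => l ++ [q.2])) PySem.Dict.empty := by
    rw [List.foldl_flatMap]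
    unfold ownersOf
    refine PySem.List.foldl_congr_mem _ _ _ _ ?_
    intro acc p _
    rw [List.foldl_map]
  rw [h1, PySem.Dict.getD_foldl_modify_append]
  have hempty : (PySem.Dict.empty : PySem.Dict String (List Int)).getD t [] = [] := rfl
  rw [hempty, List.nil_append, List.filter_flatMap, List.map_flatMap]
  have h2 : ∀ p ∈ PySem.List.enumerate (tagSetsOf courses tags),
      ((p.2.map (fun u => (u, p.1))).filter (fun q => q.1 == t)).map (fun x => x.2)
      = (fun p : Int × PySem.Set String => if p.2.contains t then [p.1] else []) p := by
    intro p hp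
    have hnd : p.2.Nodup := by
      refine nodup_mem_tagSets courses tags p.2 ?_
      rcases (PySem.List.mem_enumerate_iff _ _ _).mp hp with ⟨k, hk, rfl⟩
      exact List.getElem_mem _
    rw [List.filter_map]
    have : (fun q : String × Int => q.1 == t) ∘ (fun u => (u, p.1)) = (fun u => u == t) := rfl
    rw [this, List.filter_beq]
    by_cases hmem : t ∈ p.2
    · rw [List.count_eq_one_of_mem hnd hmem]
      simp [PySem.Set.contains, hmem]
    · rw [List.count_eq_zero_of_not_mem hmem]
      simp [PySem.Set.contains, hmem]
  rw [List.flatMap_def, List.map_congr_left h2, ← List.flatMap_def, flatMap_ite_singleton]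

lemma sum_ite_one_zero_nat {α : Type} (q : α → Bool) (l : List α) :
    (l.map (fun x => if q x then 1 else 0)).sum = l.countP q := by
  induction l with
  | nil => rfl
  | cons x xs ih => by_cases h : q x <;> simp [h, ih] <;> omega

-- B's row counter holds exactly the intersection sizes
lemma cnt_getD (courses : List String) (tags : List (String × List String))
    (s : PySem.Set String) (c : Int) (hc0 : 0 ≤ c)
    (hcn : c.toNat < (tagSetsOf courses tags).length) :
    ((s.foldl
      (fun d t => (((ownersOf courses tags).getD t []).foldl (fun d j => d.modify j 0 (fun v => v + 1)) d))
      PySem.Dict.empty).getD c 0)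
    = ((s.filter (fun t => ((tagSetsOf courses tags)[c.toNat]'hcn).contains t)).length : Int) := by
  rw [← List.foldl_flatMap, PySem.Dict.getD_foldl_modify_add_one]
  have hempty : (PySem.Dict.empty : PySem.Dict Int Int).getD c 0 = 0 := rfl
  rw [hempty, zero_add, List.count_flatMap]
  have h2 : ∀ t ∈ s, (List.count c ∘ fun t => (ownersOf courses tags).getD t []) t
      = if ((tagSetsOf courses tags)[c.toNat]'hcn).contains t then 1 else 0 := by
    intro t _
    simp only [Function.comp_apply]
    rw [owners_getD]
    have hnd : (((PySem.List.enumerate (tagSetsOf courses tags)).filter (fun p => p.2.contains t)).map (·.1)).Nodup := by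
      refine List.Nodup.sublist (List.Sublist.map _ List.filter_sublist) ?_
      rw [PySem.List.map_fst_enumerate]
      exact PySem.List.nodup_pyRange_one _ _
    by_cases hm : ((tagSetsOf courses tags)[c.toNat]'hcn).contains t
    · rw [if_pos hm]
      refine List.count_eq_one_of_mem hnd ?_
      simp only [List.mem_map, List.mem_filter]
      refine ⟨(c, (tagSetsOf courses tags)[c.toNat]'hcn), ⟨?_, hm⟩, rfl⟩
      rw [PySem.List.mem_enumerate_iff]
      exact ⟨c.toNat, hcn, by simp [Int.toNat_of_nonneg hc0]⟩
    · rw [if_neg hm]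
      rw [List.count_eq_zero]
      simp only [List.mem_map, List.mem_filter, not_exists]
      rintro ⟨j, u⟩ ⟨⟨hmem, hcon⟩, hfst⟩
      rcases (PySem.List.mem_enumerate_iff _ _ _).mp hmem with ⟨k, hk, hpk⟩
      simp only [Prod.mk.injEq] at hpk
      obtain ⟨hj, hu⟩ := hpk
      apply hm
      have hkc : k = c.toNat := by omega
      subst hkc
      subst hu
      exact hcon
  rw [List.map_congr_left h2, sum_ite_one_zero_nat, List.countP_eq_length_filter]

lemma map_idx_eq (g : String → String) (TL : List String) :
    (PySem.List.pyRange 0 (PySem.List.len TL)).map (fun i => g (PySem.List.pyGetD TL i "")) = TL.map g := by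
  rw [show (fun i => g (PySem.List.pyGetD TL i "")) = g ∘ (fun i => PySem.List.pyGetD TL i "") from rfl,
    ← List.map_map, PySem.List.map_pyGetD_pyRange_zero]

-- A's '", " before every element but the first' emission loops, as join over the list
lemma presec_eq (g : String → String) (TL : List String) (hdr : String) :
    (PySem.List.pyRange 0 (PySem.List.len TL)).foldl
      (fun acc i => (if i ≠ 0 then acc ++ ",\n" else acc) ++ "    \"" ++ g (PySem.List.pyGetD TL i "") ++ "\"") hdr
    = hdr ++ PySem.Str.join ",\n" (TL.map (fun t => "    \"" ++ g t ++ "\"")) := by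
  rw [PySem.List.foldl_congr_mem _ _
      (fun acc i => (if i ≠ 0 then acc ++ ",\n" else acc)
        ++ ((fun t => "    \"" ++ g t ++ "\"") (PySem.List.pyGetD TL i ""))) _
      (by intro acc i _; simp [String.append_assoc])]
  rw [foldl_sepbefore]
  exact congrArg (fun l => hdr ++ PySem.Str.join ",\n" l)
    (map_idx_eq (fun t => "    \"" ++ g t ++ "\"") TL)


lemma foldl_sepafter' (f : Int → String) (sep : String) (b a : Int) (s : String) :
    (PySem.List.pyRange a b).foldl
      (fun acc j => if j < b - 1 then (acc ++ f j) ++ sep else acc ++ f j) s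
    = s ++ PySem.Str.join sep ((PySem.List.pyRange a b).map f) :=
  foldl_sepafter f sep b (b - a).toNat a rfl s

-- A's matrix row i, as a string
def rowStrA (courses : List String) (tags : List (String × List String)) (i : Int) : String :=
  "[" ++ (PySem.Str.join "," ((PySem.List.pyRange 0 (PySem.List.len courses)).map (fun j =>
    PySem.Int.toStr (if i ≠ j then
      ((PySem.Set.ofList ((PySem.Dict.mk tags).getD (PySem.List.pyGetD courses i "") [])).inter
        (PySem.Set.ofList ((PySem.Dict.mk tags).getD (PySem.List.pyGetD courses j "") []))).len
      else 0))) ++ "]")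

-- one matrix cell: A's pairwise intersection size is B's counter entry
lemma cell_eq (courses : List String) (tags : List (String × List String)) (i j : Int)
    (hi0 : 0 ≤ i) (hi : i < (courses.length : Int)) (hj0 : 0 ≤ j) (hj : j < (courses.length : Int)) :
    PySem.Int.toStr (if i ≠ j then
      ((PySem.Set.ofList ((PySem.Dict.mk tags).getD (PySem.List.pyGetD courses i "") [])).inter
        (PySem.Set.ofList ((PySem.Dict.mk tags).getD (PySem.List.pyGetD courses j "") []))).len
      else 0)
    = if (j == i) then "0" else PySem.Int.toStr
        (((PySem.List.pyGetD (tagSetsOf courses tags) i []).foldl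
          (fun c t => ((ownersOf courses tags).getD t []).foldl (fun c j => c.modify j 0 (fun v => v + 1)) c)
          PySem.Dict.empty).getD j 0) := by
  have hts_len : (tagSetsOf courses tags).length = courses.length := by simp [tagSetsOf]
  by_cases hij : j = i
  · subst hij
    rw [if_neg (by simp : ¬ (j ≠ j)), if_pos (by simp : (j == j) = true)]
    rfl
  · rw [if_pos (show i ≠ j from fun h => hij h.symm),
        if_neg (show ¬ ((j == i) = true) from by simp [hij])]
    have hL : PySem.List.pyGetD (tagSetsOf courses tags) i []
        = (tagSetsOf courses tags)[i.toNat]'(by omega) :=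
      PySem.List.pyGetD_eq_getElem _ _ hi0 (by omega)
    rw [hL, cnt_getD courses tags _ j hj0 (by omega)]
    have hX : PySem.Set.ofList ((PySem.Dict.mk tags).getD (PySem.List.pyGetD courses i "") [])
        = (tagSetsOf courses tags)[i.toNat]'(by omega) := by
      rw [PySem.List.pyGetD_eq_getElem courses "" hi0 hi]
      simp [tagSetsOf]
    have hY : PySem.Set.ofList ((PySem.Dict.mk tags).getD (PySem.List.pyGetD courses j "") [])
        = (tagSetsOf courses tags)[j.toNat]'(by omega) := by
      rw [PySem.List.pyGetD_eq_getElem courses "" hj0 hj]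
      simp [tagSetsOf]
    rw [hX, hY]
    rfl

-- the pointwise equality of the two programs
theorem gg_eq (courses : List String) (tags : List (String × List String)) :
    gen_graph courses tags = gen_graph_alt courses tags := by
  simp only [gen_graph, gen_graph_alt]
  congr 1
  case _ =>
    congr 1
    case _ =>
      congr 1
      case _ =>
        congr 1
        rw [show List.map (fun c => PySem.Set.ofList ((PySem.Dict.mk tags).getD c [])) courses
            = tagSetsOf courses tags from rfl]
        rw [show (PySem.List.enumerate (tagSetsOf courses tags)).foldl
              (fun o p => p.2.foldl (fun o t => o.modify t [] (fun l => l ++ [p.1])) o) PySem.Dict.empty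
            = ownersOf courses tags from rfl]
        rw [PySem.List.foldl_congr_mem _ _
            (fun acc i => if i < PySem.List.len courses - 1
              then (acc ++ rowStrA courses tags i) ++ ",\n" else acc ++ rowStrA courses tags i) _
            (by
              intro acc i _
              rw [foldl_sepafter']
              unfold rowStrA
              by_cases h : i < PySem.List.len courses - 1 <;>
                simp only [h, if_true, if_false, String.append_assoc])]
        rw [foldl_sepafter']
        refine congrArg (fun l => "var matrix = [" ++ PySem.Str.join ",\n" l) ?_
        rw [PySem.List.enumerate_eq_map_pyRange (tagSetsOf courses tags) ([] : List String)]
        rw [List.map_map]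
        rw [show PySem.List.len (tagSetsOf courses tags) = PySem.List.len courses from by
          simp [tagSetsOf, PySem.List.len]]
        symm
        refine List.map_congr_left ?_
        intro i hi
        obtain ⟨hi0, hilt⟩ := PySem.List.mem_pyRange_one.mp hi
        have hlen : i < (courses.length : Int) := by simpa [PySem.List.len] using hilt
        dsimp only [Function.comp]
        have hcells := List.map_congr_left (l := PySem.List.pyRange 0 (PySem.List.len courses))
          (fun j hj => by
            obtain ⟨hj0, hjlt⟩ := PySem.List.mem_pyRange_one.mp hj
            exact (cell_eq courses tags i j hi0 hlen hj0 (by simpa [PySem.List.len] using hjlt)).symm)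
        rw [hcells]
        unfold rowStrA
        simp only [String.append_assoc]
      case _ =>
        congr 1
        rw [PySem.List.foldl_prod_mk
          (fun acc i => (if i ≠ 0 then acc ++ ",\n" else acc) ++ "    \"" ++ PySem.Str.slice (PySem.List.pyGetD courses i "") (some 0) (some 6) ++ "\"")
          (fun acc i => (if i ≠ 0 then acc ++ ",\n" else acc) ++ "    \"" ++ PySem.Str.slice (PySem.List.pyGetD courses i "") (some 7) none ++ "\"")
          (PySem.List.pyRange 0 (PySem.List.len courses)) "var courseLabels = [\n" "var courseTitles = [\n"]
        exact presec_eq (fun c => PySem.Str.slice c (some 0) (some 6)) courses "var courseLabels = [\n"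
    case _ =>
      congr 1
      rw [PySem.List.foldl_prod_mk
          (fun acc i => (if i ≠ 0 then acc ++ ",\n" else acc) ++ "    \"" ++ PySem.Str.slice (PySem.List.pyGetD courses i "") (some 0) (some 6) ++ "\"")
          (fun acc i => (if i ≠ 0 then acc ++ ",\n" else acc) ++ "    \"" ++ PySem.Str.slice (PySem.List.pyGetD courses i "") (some 7) none ++ "\"")
          (PySem.List.pyRange 0 (PySem.List.len courses)) "var courseLabels = [\n" "var courseTitles = [\n"]
      exact presec_eq (fun c => PySem.Str.slice c (some 7) none) courses "var courseTitles = [\n"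
  case _ =>
    rw [List.foldl_map]
    congr 1
    exact presec_eq (fun t => t) (all_tags_port courses tags) "var tags = [\n"

-- ===== VERDICT (by name: the statement is the Claim_ definition above) =====
theorem gen_graph_spec : Claim_equal_gen_graph := by
  intro courses tags _ _
  unfold Spec_gen_graph
  exact gg_eq courses tags
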